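-- pv_equiv track=rewrite | github.com/AlexAb123/Advent-of-Code-Solutions | AOC2021/03_Day.py | getOnesAndZeroes
-- ===== SOURCE A (Python) =====
-- from collections import Counter
--
-- def getOnesAndZeroes(lines):
--     columns = ["".join([line[i] for line in lines]) for i in range(len(lines[0]))]
--     zeroes = []
--     ones = []
--     for column in columns:
--         counter = Counter(column)
--         zeroes.append(counter["0"])
--         ones.append(counter["1"])
--     return ones, zeroes
-- ===== SOURCE B (Python) =====
-- def getOnesAndZeroes(lines):
--     n = len(lines[0])
--     ones = [0] * n
--     zeroes = [0] * n
--     for line in lines: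
--         ones = [o + (c == "1") for o, c in zip(ones, line)]
--         zeroes = [z + (c == "0") for z, c in zip(zeroes, line)]
--     return ones, zeroes
-- ===== Notes on version B (the rewrite author's own statement) =====
-- stated objective: simpler
-- what changed: B drops A's transpose-into-column-strings and per-column Counter stages: it makes one sweep over the rows, updating the ones and zeroes vectors elementwise with zip.
import Mathlib
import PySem

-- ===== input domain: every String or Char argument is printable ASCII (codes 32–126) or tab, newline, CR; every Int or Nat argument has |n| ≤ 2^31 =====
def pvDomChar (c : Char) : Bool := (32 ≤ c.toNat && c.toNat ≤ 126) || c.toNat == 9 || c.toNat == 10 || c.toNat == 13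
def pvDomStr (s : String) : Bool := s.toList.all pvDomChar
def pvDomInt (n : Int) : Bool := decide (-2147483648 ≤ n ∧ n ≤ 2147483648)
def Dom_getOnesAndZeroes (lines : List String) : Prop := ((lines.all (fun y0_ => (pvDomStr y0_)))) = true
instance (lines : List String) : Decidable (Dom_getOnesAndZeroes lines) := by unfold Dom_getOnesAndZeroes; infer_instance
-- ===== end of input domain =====

-- B replaces A's transpose-then-Counter two-stage pass by a single sweep over the
-- rows that updates the ones/zeroes vectors elementwise via zip (objective: simpler).

-- ===== PORT A =====
def getOnesAndZeroes (lines : List String) : List Int × List Int :=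
  let n : Int := PySem.Str.len ((PySem.List.pyGet? lines 0).getD "")
  let columns : List (List Char) :=
    (PySem.List.pyRange 0 n 1).map (fun i =>
      lines.map (fun line => (PySem.Str.pyGet? line i).getD ' '))
  let p := columns.foldl (fun (acc : List Int × List Int) column =>
      let counter := PySem.Dict.counter column
      (acc.1 ++ [counter.getD '0' 0], acc.2 ++ [counter.getD '1' 0])) ([], [])
  (p.2, p.1)

-- ===== PORT B =====
def getOnesAndZeroes_alt (lines : List String) : List Int × List Int :=
  let n : Int := PySem.Str.len ((PySem.List.pyGet? lines 0).getD "")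
  let init : List Int := List.replicate n.toNat 0
  lines.foldl (fun (acc : List Int × List Int) line =>
      ((acc.1.zip line.toList).map (fun oc => oc.1 + (if oc.2 == '1' then 1 else 0)),
       (acc.2.zip line.toList).map (fun zc => zc.1 + (if zc.2 == '0' then 1 else 0))))
    (init, init)

-- ===== PRECONDITION & SPEC =====
-- Pre_ excludes exactly the inputs on which A raises IndexError: the empty list
-- (lines[0]) and lists containing a line shorter than the first line (line[i]).
def Pre_getOnesAndZeroes (lines : List String) : Prop :=
  lines ≠ [] ∧ ∀ line ∈ lines, (lines.headD "").toList.length ≤ line.toList.length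
instance (lines : List String) : Decidable (Pre_getOnesAndZeroes lines) := by
  unfold Pre_getOnesAndZeroes; infer_instance

def pvWitness_getOnesAndZeroes : List String := ["01", "10", "11"]

def Spec_getOnesAndZeroes (lines : List String) (out : List Int × List Int) : Prop :=
  out = getOnesAndZeroes_alt lines
instance (lines : List String) (out : List Int × List Int) : Decidable (Spec_getOnesAndZeroes lines out) := by
  unfold Spec_getOnesAndZeroes; infer_instance

-- ===== CLAIM (what is proved, stated in full; the proofs are below) =====
def Claim_equal_getOnesAndZeroes : Prop := ∀ (lines : List String), Dom_getOnesAndZeroes lines → Pre_getOnesAndZeroes lines → Spec_getOnesAndZeroes lines (getOnesAndZeroes lines)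

-- ===== LEMMAS AND PROOFS =====

-- A's append-fold over the columns is a pair of maps.
theorem foldA_eq_map (cols : List (List Char)) (a b : List Int) :
    cols.foldl (fun (acc : List Int × List Int) column =>
        let counter := PySem.Dict.counter column
        (acc.1 ++ [counter.getD '0' 0], acc.2 ++ [counter.getD '1' 0])) (a, b)
      = (a ++ cols.map (fun col => ((col.count '0' : Int))),
         b ++ cols.map (fun col => ((col.count '1' : Int)))) := by
  induction cols generalizing a b with
  | nil => simp
  | cons c cs ih => rw [List.foldl_cons, ih]; simp [PySem.Dict.getD_counter]

-- A fold over pairs whose components are updated independently splits.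
theorem foldl_prod_split {γ : Type} (css : List γ)
    (f1 f2 : List Int → γ → List Int) (o z : List Int) :
    css.foldl (fun (acc : List Int × List Int) cs => (f1 acc.1 cs, f2 acc.2 cs)) (o, z)
      = (css.foldl f1 o, css.foldl f2 z) := by
  induction css generalizing o z with
  | nil => rfl
  | cons c cs ih => simp [ih]

-- One zip/map step, pointwise.
theorem zipstep_getElem (o : List Int) (cs : List Char) (g : Char → Int)
    (k : Nat) (hk : k < o.length) (hk' : k < cs.length) :
    ((o.zip cs).map (fun p => p.1 + g p.2))[k]'(by simp; omega)
      = o[k] + g cs[k] := by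
  simp

-- B's per-character fold: lengths stay n and entry k accumulates the column-k count.
theorem foldB_one (css : List (List Char)) (n : Nat) (c1 : Char) (v : List Int)
    (hv : v.length = n) (h : ∀ cs ∈ css, n ≤ cs.length) :
    (css.foldl (fun (v : List Int) cs =>
        (v.zip cs).map (fun p => p.1 + (if p.2 == c1 then 1 else 0))) v).length = n ∧
    ∀ k, k < n →
      (css.foldl (fun (v : List Int) cs =>
        (v.zip cs).map (fun p => p.1 + (if p.2 == c1 then 1 else 0))) v).getD k 0
        = v.getD k 0 + ((css.map (fun cs => cs.getD k ' ')).count c1 : Int) := by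
  induction css generalizing v with
  | nil => simp [hv]
  | cons cs css ih =>
    have hcs : n ≤ cs.length := h cs (List.mem_cons_self ..)
    have hlen : ((v.zip cs).map (fun p => p.1 + (if p.2 == c1 then 1 else 0))).length = n := by
      simp; omega
    have hrest : ∀ c ∈ css, n ≤ c.length := fun c hc => h c (List.mem_cons_of_mem _ hc)
    obtain ⟨ihl, ihk⟩ := ih _ hlen hrest
    refine ⟨ihl, fun k hk => ?_⟩
    rw [List.foldl_cons, ihk k hk]
    have hkv : k < v.length := by omega
    have hkc : k < cs.length := by omega
    have hstep : ((v.zip cs).map (fun p => p.1 + (if p.2 == c1 then 1 else 0))).getD k 0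
        = v[k] + (if cs[k] == c1 then 1 else 0) := by
      rw [List.getD_eq_getElem _ _ (by omega)]
      exact zipstep_getElem v cs (fun c => if c == c1 then 1 else 0) k hkv hkc
    rw [hstep, List.getD_eq_getElem _ _ hkv, List.map_cons, List.count_cons,
        List.getD_eq_getElem _ _ hkc]
    push_cast
    by_cases hc : cs[k] == c1 <;> simp [hc] <;> ring

-- ===== VERDICT (by name: the statement is the Claim_ definition above) =====
theorem getOnesAndZeroes_spec : Claim_equal_getOnesAndZeroes := by
  intro lines _ hpre
  obtain ⟨hne, hlen⟩ := hpre
  cases lines with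
  | nil => exact absurd rfl hne
  | cons l0 rest =>
    unfold Spec_getOnesAndZeroes getOnesAndZeroes getOnesAndZeroes_alt
    simp only [PySem.List.pyGet?_zero_cons, Option.getD_some, PySem.Str.len_eq]
    set N := l0.toList.length with hN
    have hcol : ∀ line ∈ l0 :: rest, N ≤ line.toList.length := by
      intro line hl; simpa using hlen line hl
    rw [foldA_eq_map]
    rw [PySem.List.pyRange_one]
    have hNN : ((N : Int) - 0).toNat = N := by omega
    have hNN' : ((N : Int)).toNat = N := by omega
    rw [hNN, hNN']
    -- B side: move String.toList into the list being folded, then split the pair fold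
    rw [show ((l0 :: rest).foldl (fun (acc : List Int × List Int) line =>
          ((acc.1.zip line.toList).map (fun oc => oc.1 + (if oc.2 == '1' then 1 else 0)),
           (acc.2.zip line.toList).map (fun zc => zc.1 + (if zc.2 == '0' then 1 else 0))))
          (List.replicate N 0, List.replicate N 0))
        = (((l0 :: rest).map String.toList).foldl (fun (acc : List Int × List Int) cs =>
          ((acc.1.zip cs).map (fun oc => oc.1 + (if oc.2 == '1' then 1 else 0)),
           (acc.2.zip cs).map (fun zc => zc.1 + (if zc.2 == '0' then 1 else 0))))
          (List.replicate N 0, List.replicate N 0)) by rw [List.foldl_map]]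
    rw [foldl_prod_split ((l0 :: rest).map String.toList)
        (fun v cs => (v.zip cs).map (fun oc => oc.1 + (if oc.2 == '1' then 1 else 0)))
        (fun v cs => (v.zip cs).map (fun zc => zc.1 + (if zc.2 == '0' then 1 else 0)))
        (List.replicate N 0) (List.replicate N 0)]
    have hcss : ∀ cs ∈ (l0 :: rest).map String.toList, N ≤ cs.length := by
      intro cs hcs
      obtain ⟨line, hl, rfl⟩ := List.mem_map.mp hcs
      exact hcol line hl
    obtain ⟨hl1, hk1⟩ := foldB_one ((l0 :: rest).map String.toList) N '1'
      (List.replicate N 0) (by simp) hcss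
    obtain ⟨hl0, hk0⟩ := foldB_one ((l0 :: rest).map String.toList) N '0'
      (List.replicate N 0) (by simp) hcss
    refine Prod.ext ?_ ?_ <;> simp only []
    · apply List.ext_getElem (by simpa using hl1.symm)
      intro k h1 h2
      have hk : k < N := by simpa using h1
      have := hk1 k hk
      rw [List.getD_eq_getElem _ _ (by omega)] at this
      rw [this]
      simp [List.map_map, Function.comp_def, List.getD_eq_getElem?_getD]
    · apply List.ext_getElem (by simpa using hl0.symm)
      intro k h1 h2
      have hk : k < N := by simpa using h1
      have := hk0 k hk
      rw [List.getD_eq_getElem _ _ (by omega)] at this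
      rw [this]
      simp [List.map_map, Function.comp_def, List.getD_eq_getElem?_getD]
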